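-- pv_equiv track=rewrite | github.com/superspeeder101/mystuffs | parser.py | get_in_parenthesis
-- ===== SOURCE A (Python) =====
-- def get_in_parenthesis(data):
--   indexes = []
--   cindexs = []
--
--   for ind, char in enumerate(list(data)):
--     if len(cindexs) == 0:
--       if char == "(":
--         cindexs.append(ind+1)
--
--     if len(cindexs) == 1:
--       if char == ")":
--         cindexs.append(ind)
--         indexes.append(tuple(cindexs))
--         cindexs = []
--
--
--   out = []
--   for index in indexes:
--     out.append(data[slice(*index)])
--
--   return out
-- ===== SOURCE B (Python) =====
-- def get_in_parenthesis(data):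
--   out = []
--   rest = data
--   while True:
--     _, sep, rest = rest.partition("(")
--     if not sep:
--       return out
--     inner, sep, rest = rest.partition(")")
--     if not sep:
--       return out
--     out.append(inner)
-- ===== Notes on version B (the rewrite author's own statement) =====
-- stated objective: idiomatic
-- what changed: Replaces the per-character state machine (index lists recorded, then a second slicing pass) with a single while-loop that jumps from pair to pair using str.partition, building each inner substring directly.
import Mathlib
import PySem

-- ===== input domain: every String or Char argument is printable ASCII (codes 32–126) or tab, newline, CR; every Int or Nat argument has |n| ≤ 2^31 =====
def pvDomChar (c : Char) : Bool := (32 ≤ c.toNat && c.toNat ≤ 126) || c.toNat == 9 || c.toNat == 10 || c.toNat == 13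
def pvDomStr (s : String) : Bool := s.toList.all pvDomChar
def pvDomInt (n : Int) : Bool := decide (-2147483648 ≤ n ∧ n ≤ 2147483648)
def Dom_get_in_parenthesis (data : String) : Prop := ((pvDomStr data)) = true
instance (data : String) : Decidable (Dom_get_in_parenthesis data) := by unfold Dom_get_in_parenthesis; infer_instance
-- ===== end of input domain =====

-- B replaces A's per-character state machine (recorded index pairs + a second slicing pass)
-- with an idiomatic while-loop jumping from pair to pair via str.partition; same return value.

-- ===== PORT A =====
-- one iteration of A's for-loop: state = (indexes, cindexs)
def aStep (st : List (Int × Int) × List Int) (p : Int × Char) : List (Int × Int) × List Int :=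
  let cindexs := if st.2.length = 0 then (if p.2 = '(' then st.2 ++ [p.1 + 1] else st.2) else st.2
  if cindexs.length = 1 ∧ p.2 = ')' then
    (st.1 ++ [(cindexs.headI, p.1)], ([] : List Int))   -- cindexs.append(ind); indexes.append(tuple(cindexs)); cindexs = []
  else (st.1, cindexs)

def get_in_parenthesis (data : String) : List String :=
  let r := (PySem.List.enumerate data.toList).foldl aStep ([], [])
  r.1.foldl (fun out idx => out ++ [PySem.Str.slice data (some idx.1) (some idx.2)]) []

-- ===== PORT B =====
-- hand port of Python's str.partition(sep) for a one-character sep: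
-- exact (splits at the FIRST occurrence; middle component is 'was sep found')
def pyPartition1 : List Char → Char → List Char × Bool × List Char
  | [], _ => ([], false, [])
  | x :: t, c =>
      if x = c then ([], true, t)
      else ((x :: (pyPartition1 t c).1), (pyPartition1 t c).2)

-- termination fact for the while-loop: a successful partition strictly shrinks the rest
lemma pyPartition1_true_len (cs : List Char) (c : Char)
    (h : (pyPartition1 cs c).2.1 = true) : (pyPartition1 cs c).2.2.length < cs.length := by
  induction cs with
  | nil => simp [pyPartition1] at h
  | cons x t ih =>
    by_cases hx : x = c
    · simp [pyPartition1, hx]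
    · simp only [pyPartition1, hx, if_false] at h ⊢
      exact Nat.lt_trans (ih h) (by simp)

def altLoop (out : List String) (rest : List Char) : List String :=
  let p1 := pyPartition1 rest '('
  if p1.2.1 = false then out
  else
    let p2 := pyPartition1 p1.2.2 ')'
    if p2.2.1 = false then out
    else altLoop (out ++ [String.ofList p2.1]) p2.2.2
termination_by rest.length
decreasing_by
  rename_i h1 h2
  exact Nat.lt_trans (pyPartition1_true_len _ _ (by simpa using h2))
    (pyPartition1_true_len _ _ (by simpa using h1))

def get_in_parenthesis_alt (data : String) : List String := altLoop [] data.toList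

-- ===== PRECONDITION & SPEC =====
def Spec_get_in_parenthesis (data : String) (out : List String) : Prop := out = get_in_parenthesis_alt data
instance (data : String) (out : List String) : Decidable (Spec_get_in_parenthesis data out) := by unfold Spec_get_in_parenthesis; infer_instance

-- ===== CLAIM (what is proved, stated in full; the proofs are below) =====
def Claim_equal_get_in_parenthesis : Prop := ∀ (data : String), Dom_get_in_parenthesis data → Spec_get_in_parenthesis data (get_in_parenthesis data)

-- ===== LEMMAS AND PROOFS =====

-- A's recorded index pairs rendered as the slices A returns in its second loop
def aOut (data : String) (idxs : List (Int × Int)) : List String :=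
  idxs.map (fun idx => PySem.Str.slice data (some idx.1) (some idx.2))

lemma pyPartition1_cons_eq (c : Char) (cs : List Char) :
    pyPartition1 (c :: cs) c = ([], true, cs) := by
  simp [pyPartition1]

lemma pyPartition1_cons_ne {x c : Char} (cs : List Char) (h : x ≠ c) :
    pyPartition1 (x :: cs) c = (x :: (pyPartition1 cs c).1, (pyPartition1 cs c).2) := by
  simp [pyPartition1, h]

-- the part before the separator is an initial segment of the scanned list
lemma pyPartition1_take (cs : List Char) (c : Char) :
    cs.take (pyPartition1 cs c).1.length = (pyPartition1 cs c).1 := by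
  induction cs with
  | nil => simp [pyPartition1]
  | cons x t ih =>
    by_cases hx : x = c
    · simp [pyPartition1, hx]
    · simp [pyPartition1, hx, ih]

lemma altLoop_nil (out : List String) : altLoop out [] = out := by
  rw [altLoop]; simp [pyPartition1]

lemma altLoop_append (rest : List Char) (out : List String) :
    altLoop out rest = out ++ altLoop [] rest := by
  induction hn : rest.length using Nat.strong_induction_on generalizing rest out with
  | _ n ih =>
  rw [altLoop, altLoop]
  by_cases h1 : (pyPartition1 rest '(').2.1 = false
  · simp [h1]
  · simp only [h1]
    by_cases h2 : (pyPartition1 (pyPartition1 rest '(').2.2 ')').2.1 = false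
    · simp [h2]
    · simp only [h2]
      have hlt : (pyPartition1 (pyPartition1 rest '(').2.2 ')').2.2.length < n := by
        subst hn
        exact Nat.lt_trans (pyPartition1_true_len _ _ (by simpa using h2))
          (pyPartition1_true_len _ _ (by simpa using h1))
      have hL := ih _ hlt (pyPartition1 (pyPartition1 rest '(').2.2 ')').2.2
        (out ++ [String.ofList (pyPartition1 (pyPartition1 rest '(').2.2 ')').1]) rfl
      have hR := ih _ hlt (pyPartition1 (pyPartition1 rest '(').2.2 ')').2.2
        ([] ++ [String.ofList (pyPartition1 (pyPartition1 rest '(').2.2 ')').1]) rfl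
      rw [hL, hR]
      simp

-- one unfolding of B's loop after consuming a '('
lemma altLoop_cons_open (cs : List Char) :
    altLoop [] ('(' :: cs) =
      if (pyPartition1 cs ')').2.1 = true
        then String.ofList (pyPartition1 cs ')').1 :: altLoop [] (pyPartition1 cs ')').2.2
        else [] := by
  rw [altLoop]
  simp only [pyPartition1_cons_eq]
  cases hb : (pyPartition1 cs ')').2.1 with
  | false => simp
  | true =>
    simp only [Bool.true_eq_false, if_false, if_true, List.nil_append]
    rw [altLoop_append]
    rfl

lemma altLoop_cons_ne {c : Char} (cs : List Char) (out : List String) (h : c ≠ '(') :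
    altLoop out (c :: cs) = altLoop out cs := by
  rw [altLoop, altLoop]
  simp only [pyPartition1_cons_ne cs h]

-- Python slice data[k:k+m] of the suffix cs = data[k:] is the first m characters of cs
lemma slice_eq_ofList (data : String) (k m : Nat) (cs : List Char)
    (h : data.toList.drop k = cs) :
    PySem.Str.slice data (some (k : Int)) (some ((k + m : Nat) : Int)) = String.ofList (cs.take m) := by
  rw [show PySem.Str.slice data (some (k : Int)) (some ((k + m : Nat) : Int))
        = String.ofList (PySem.List.slice data.toList (some (k : Int)) (some ((k + m : Nat) : Int))) by
      simp [PySem.Str.slice]]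
  rw [show ((k + m : Nat) : Int) = ((k : Nat) : Int) + ((m : Nat) : Int) by push_cast; ring]
  rw [PySem.List.slice_natCast_add, h]

-- the main loop correspondence: A's fold on any suffix (with either loop state) matches B's
-- partition recursion on that suffix; strong induction on the suffix length
lemma main_loop (data : String) :
    ∀ (n : Nat) (cs : List Char) (k : Nat), cs.length ≤ n → data.toList.drop k = cs →
      (∀ acc : List (Int × Int),
        aOut data ((PySem.List.enumerate cs (k : Int)).foldl aStep (acc, [])).1
          = aOut data acc ++ altLoop [] cs)
      ∧ (∀ (s : Int) (acc : List (Int × Int)),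
        aOut data ((PySem.List.enumerate cs (k : Int)).foldl aStep (acc, [s])).1
          = aOut data acc ++
            (if (pyPartition1 cs ')').2.1 = true
              then PySem.Str.slice data (some s) (some ((k + (pyPartition1 cs ')').1.length : Nat) : Int))
                    :: altLoop [] (pyPartition1 cs ')').2.2
              else [])) := by
  intro n
  induction n with
  | zero =>
    intro cs k hlen hdrop
    have : cs = [] := List.length_eq_zero_iff.mp (Nat.le_zero.mp hlen)
    subst this
    refine ⟨fun acc => ?_, fun s acc => ?_⟩
    · simp [PySem.List.enumerate, altLoop_nil]
    · simp [PySem.List.enumerate, pyPartition1]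
  | succ n ih =>
    intro cs k hlen hdrop
    cases cs with
    | nil =>
      refine ⟨fun acc => ?_, fun s acc => ?_⟩
      · simp [PySem.List.enumerate, altLoop_nil]
      · simp [PySem.List.enumerate, pyPartition1]
    | cons c cs' =>
      have hdrop' : data.toList.drop (k + 1) = cs' := by
        have h2 := congrArg List.tail hdrop
        simpa [List.tail_drop] using h2
      have hlen' : cs'.length ≤ n := by
        simpa using Nat.le_of_succ_le_succ (by simpa using hlen)
      obtain ⟨ihG, ihH⟩ := ih cs' (k + 1) hlen' hdrop'
      have hcast : ((k : Int) + 1) = ((k + 1 : Nat) : Int) := by push_cast; ring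
      constructor
      · intro acc
        rw [PySem.List.enumerate_cons, List.foldl_cons]
        by_cases hc : c = '('
        · subst hc
          have hstep : aStep (acc, ([] : List Int)) ((k : Int), '(') = (acc, [(k : Int) + 1]) := by
            simp [aStep]
          rw [hstep, hcast, ihH, altLoop_cons_open cs']
          cases h2 : (pyPartition1 cs' ')').2.1 with
          | false => simp
          | true =>
            simp only [if_true]
            rw [slice_eq_ofList data (k + 1) ((pyPartition1 cs' ')').1.length) cs' hdrop',
              pyPartition1_take]
        · have hstep : aStep (acc, ([] : List Int)) ((k : Int), c) = (acc, []) := by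
            simp [aStep, hc]
          rw [hstep, hcast, ihG acc, altLoop_cons_ne cs' [] hc]
      · intro s acc
        rw [PySem.List.enumerate_cons, List.foldl_cons]
        by_cases hc : c = ')'
        · subst hc
          have hstep : aStep (acc, [s]) ((k : Int), ')') = (acc ++ [(s, (k : Int))], []) := by
            simp [aStep]
          rw [hstep, hcast, ihG (acc ++ [(s, (k : Int))])]
          simp only [pyPartition1_cons_eq, if_true]
          simp [aOut]
        · have hstep : aStep (acc, [s]) ((k : Int), c) = (acc, [s]) := by
            simp [aStep, hc]
          rw [hstep, hcast, ihH s acc, pyPartition1_cons_ne cs' hc]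
          simp only [List.length_cons]
          rw [show k + 1 + (pyPartition1 cs' ')').1.length = k + ((pyPartition1 cs' ')').1.length + 1) from by omega]

-- ===== VERDICT (by name: the statement is the Claim_ definition above) =====
theorem get_in_parenthesis_spec : Claim_equal_get_in_parenthesis := by
  intro data _
  unfold Spec_get_in_parenthesis get_in_parenthesis get_in_parenthesis_alt
  obtain ⟨hG, -⟩ := main_loop data data.toList.length data.toList 0 le_rfl (by simp)
  have h0 := hG []
  simp only [Nat.cast_zero, aOut] at h0
  simp only [PySem.List.foldl_append_singleton_eq_map]
  simpa [aOut] using h0
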